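-- pv_equiv track=rewrite | github.com/yogesh45604/storyteller-app | utils.py | parse_story
-- ===== SOURCE A (Python) =====
-- def parse_story(raw_output: str):
--     lines = raw_output.strip().split("\n")
--     summary = []
--     paragraphs = []
--
--     for line in lines:
--         if line.strip().startswith("1.") or line.strip().startswith("1 "):
--             break
--         summary.append(line)
--
--     current_paragraph = []
--     for line in lines[len(summary):]:
--         if line.strip().startswith(tuple(str(i) for i in range(1, 21))):
--             if current_paragraph:
--                 paragraphs.append(" ".join(current_paragraph).strip())
--                 current_paragraph = []
--             current_paragraph.append(line)
--         else:
--             current_paragraph.append(line)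
--     if current_paragraph:
--         paragraphs.append(" ".join(current_paragraph).strip())
--
--     return "\n".join(summary).strip(), paragraphs
-- ===== SOURCE B (Python) =====
-- def _is_break(line):
--     s = line.strip()
--     return s.startswith("1.") or s.startswith("1 ")
--
--
-- def _is_boundary(line):
--     s = line.strip()
--     return s != "" and s[0] in "123456789"
--
--
-- def _chunks(rest):
--     # split into groups: each group is one line plus the following non-boundary lines
--     if not rest:
--         return []
--     body = rest[1:]
--     j = 0
--     while j < len(body) and not _is_boundary(body[j]):
--         j += 1
--     return [[rest[0]] + body[:j]] + _chunks(body[j:])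
--
--
-- def parse_story(raw_output: str):
--     lines = raw_output.strip().split("\n")
--     summary_end = next((i for i, l in enumerate(lines) if _is_break(l)), len(lines))
--     summary = "\n".join(lines[:summary_end]).strip()
--     paragraphs = [" ".join(c).strip() for c in _chunks(lines[summary_end:])]
--     return summary, paragraphs
-- ===== Notes on version B (the rewrite author's own statement) =====
-- stated objective: alternative
-- what changed: A's single buffer-accumulate-and-flush fold is replaced by computing the summary via a first-break index and take, then recursively splitting the remaining lines into boundary-headed groups (head line plus following non-boundary lines) that are joined and stripped; the 20-prefix startswith tuple test is replaced by a first-stripped-char-in-1..9 test.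
import Mathlib
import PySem

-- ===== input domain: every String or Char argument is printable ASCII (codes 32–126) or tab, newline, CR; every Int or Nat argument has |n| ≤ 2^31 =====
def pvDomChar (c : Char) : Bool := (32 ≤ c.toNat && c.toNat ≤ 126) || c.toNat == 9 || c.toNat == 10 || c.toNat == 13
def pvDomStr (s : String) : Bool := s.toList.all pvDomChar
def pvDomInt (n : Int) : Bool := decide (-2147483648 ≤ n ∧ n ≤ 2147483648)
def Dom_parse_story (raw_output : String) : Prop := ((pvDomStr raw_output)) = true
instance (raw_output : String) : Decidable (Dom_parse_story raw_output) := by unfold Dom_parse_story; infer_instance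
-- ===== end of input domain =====

-- B replaces A's buffer-accumulate-and-flush loop by a find-first-index for the summary plus a
-- recursive split of the remaining lines into boundary-headed groups (objective: alternative decomposition).

-- ===== PORT A =====
-- shared predicate: line.strip().startswith("1.") or line.strip().startswith("1 ")  (identical helper in both Pythons)
def pvIsBreak (line : String) : Bool :=
  PySem.Str.startswith (PySem.Str.strip line) "1." || PySem.Str.startswith (PySem.Str.strip line) "1 "

-- A: line.strip().startswith(tuple(str(i) for i in range(1, 21)))
def pvIsBoundaryA (line : String) : Bool :=
  ((PySem.List.pyRange 1 21 1).map PySem.Int.toStr).any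
    (fun p => PySem.Str.startswith (PySem.Str.strip line) p)

-- A's first loop: append lines until the break condition fires
def pvSummaryA : List String → List String
  | [] => []
  | l :: ls => if pvIsBreak l then [] else l :: pvSummaryA ls

-- A's second-loop body: state = (current_paragraph, paragraphs)
def pvStepA (st : List String × List String) (line : String) : List String × List String :=
  if pvIsBoundaryA line then
    let st' := if st.1 ≠ [] then (([] : List String), st.2 ++ [PySem.Str.strip (PySem.Str.join " " st.1)]) else st
    (st'.1 ++ [line], st'.2)
  else (st.1 ++ [line], st.2)

def parse_story (raw_output : String) : String × List String :=
  let lines := (PySem.Str.split? (PySem.Str.strip raw_output) "\n").getD []   -- sep "\n" ≠ "": split? is always some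
  let summary := pvSummaryA lines
  let st := (PySem.List.slice lines (some (summary.length : Int)) none).foldl pvStepA ([], [])
  let paragraphs := if st.1 ≠ [] then st.2 ++ [PySem.Str.strip (PySem.Str.join " " st.1)] else st.2
  (PySem.Str.strip (PySem.Str.join "\n" summary), paragraphs)

-- ===== PORT B =====
-- B: s = line.strip(); s != "" and s[0] in "123456789"
def pvIsBoundaryB (line : String) : Bool :=
  match (PySem.Str.strip line).toList with
  | [] => false
  | c :: _ => PySem.Chars.isIn [c] ("123456789".toList)

-- B's _chunks: head line plus following non-boundary lines, then recurse; the index scan j with the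
-- slices body[:j] / body[j:] is exactly takeWhile / dropWhile of the non-boundary predicate
def pvChunksB : List String → List (List String)
  | [] => []
  | x :: body =>
    (x :: body.takeWhile (fun l => !pvIsBoundaryB l)) ::
      pvChunksB (body.dropWhile (fun l => !pvIsBoundaryB l))
termination_by xs => xs.length
decreasing_by exact Nat.lt_succ_of_le (List.length_dropWhile_le _ body)

def parse_story_alt (raw_output : String) : String × List String :=
  let lines := (PySem.Str.split? (PySem.Str.strip raw_output) "\n").getD []
  let summaryEnd := lines.findIdx pvIsBreak   -- next((i for i, l in enumerate(lines) if _is_break(l)), len(lines))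
  let summary := PySem.Str.strip (PySem.Str.join "\n" (PySem.List.slice lines none (some (summaryEnd : Int))))
  let paragraphs := (pvChunksB (PySem.List.slice lines (some (summaryEnd : Int)) none)).map
      (fun c => PySem.Str.strip (PySem.Str.join " " c))
  (summary, paragraphs)

-- ===== PRECONDITION & SPEC =====
def Spec_parse_story (raw_output : String) (out : String × List String) : Prop := out = parse_story_alt raw_output
instance (raw_output : String) (out : String × List String) : Decidable (Spec_parse_story raw_output out) := by unfold Spec_parse_story; infer_instance

-- ===== CLAIM (what is proved, stated in full; the proofs are below) =====
def Claim_equal_parse_story : Prop := ∀ (raw_output : String), Dom_parse_story raw_output → Spec_parse_story raw_output (parse_story raw_output)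

-- ===== LEMMAS AND PROOFS =====

-- the 20 literal prefixes reduce to: first char is a nonzero digit
lemma pv_bnd_cons (c : Char) (rest : List Char) :
    (PySem.Chars.startswith (c::rest) ['1'] || (PySem.Chars.startswith (c::rest) ['2'] || (PySem.Chars.startswith (c::rest) ['3'] || (PySem.Chars.startswith (c::rest) ['4'] || (PySem.Chars.startswith (c::rest) ['5'] || (PySem.Chars.startswith (c::rest) ['6'] || (PySem.Chars.startswith (c::rest) ['7'] || (PySem.Chars.startswith (c::rest) ['8'] || (PySem.Chars.startswith (c::rest) ['9'] || (PySem.Chars.startswith (c::rest) ['1','0'] || (PySem.Chars.startswith (c::rest) ['1','1'] || (PySem.Chars.startswith (c::rest) ['1','2'] || (PySem.Chars.startswith (c::rest) ['1','3'] || (PySem.Chars.startswith (c::rest) ['1','4'] || (PySem.Chars.startswith (c::rest) ['1','5'] || (PySem.Chars.startswith (c::rest) ['1','6'] || (PySem.Chars.startswith (c::rest) ['1','7'] || (PySem.Chars.startswith (c::rest) ['1','8'] || (PySem.Chars.startswith (c::rest) ['1','9'] || (PySem.Chars.startswith (c::rest) ['2','0'])))))))))))))))))))) =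
    PySem.Chars.isIn [c] ("123456789".toList) := by
  rw [Bool.eq_iff_iff]
  simp only [Bool.or_eq_true, PySem.Chars.startswith_iff, PySem.Chars.isIn_iff_infix,
    List.cons_prefix_cons, List.nil_prefix, and_true]
  constructor
  · intro h
    rcases h with (h|h|h|h|h|h|h|h|h|⟨h,-⟩|⟨h,-⟩|⟨h,-⟩|⟨h,-⟩|⟨h,-⟩|⟨h,-⟩|⟨h,-⟩|⟨h,-⟩|⟨h,-⟩|⟨h,-⟩|⟨h,-⟩) <;>
      subst h <;> decide
  · intro h
    have hm : c ∈ ['1','2','3','4','5','6','7','8','9'] := by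
      have := h.sublist.subset; simpa using this
    fin_cases hm <;> simp


-- A's 20-prefix test equals B's "first stripped char is a nonzero digit" test
lemma pv_boundary_eq (line : String) : pvIsBoundaryA line = pvIsBoundaryB line := by
  unfold pvIsBoundaryA pvIsBoundaryB
  rw [show (PySem.List.pyRange 1 21 1).map PySem.Int.toStr
      = ["1","2","3","4","5","6","7","8","9","10","11","12","13","14","15","16","17","18","19","20"] from by decide]
  simp only [List.any_cons, List.any_nil, PySem.Str.startswith_eq, Bool.or_false]
  generalize (PySem.Str.strip line).toList = cs
  cases cs with
  | nil => decide
  | cons c rest =>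
    simp only [show ("1":String).toList = ['1'] from rfl, show ("2":String).toList = ['2'] from rfl,
      show ("3":String).toList = ['3'] from rfl, show ("4":String).toList = ['4'] from rfl,
      show ("5":String).toList = ['5'] from rfl, show ("6":String).toList = ['6'] from rfl,
      show ("7":String).toList = ['7'] from rfl, show ("8":String).toList = ['8'] from rfl,
      show ("9":String).toList = ['9'] from rfl, show ("10":String).toList = ['1','0'] from rfl,
      show ("11":String).toList = ['1','1'] from rfl, show ("12":String).toList = ['1','2'] from rfl,
      show ("13":String).toList = ['1','3'] from rfl, show ("14":String).toList = ['1','4'] from rfl,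
      show ("15":String).toList = ['1','5'] from rfl, show ("16":String).toList = ['1','6'] from rfl,
      show ("17":String).toList = ['1','7'] from rfl, show ("18":String).toList = ['1','8'] from rfl,
      show ("19":String).toList = ['1','9'] from rfl, show ("20":String).toList = ['2','0'] from rfl]
    exact pv_bnd_cons c rest

-- A's summary loop is take-up-to-the-first-break
lemma pv_summary_take (ls : List String) : pvSummaryA ls = ls.take (ls.findIdx pvIsBreak) := by
  induction ls with
  | nil => rfl
  | cons l ls ih =>
    by_cases h : pvIsBreak l
    · simp [pvSummaryA, h, List.findIdx_cons]
    · simp [pvSummaryA, h, List.findIdx_cons, ih]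

lemma pv_summary_len (ls : List String) : (pvSummaryA ls).length = ls.findIdx pvIsBreak := by
  rw [pv_summary_take, List.length_take]
  exact Nat.min_eq_left List.findIdx_le_length

-- the flush-at-boundary fold, started on a nonempty open paragraph, produces exactly the boundary-headed groups
lemma pv_fold_chunks (xs : List String) : ∀ (cur acc : List String), cur ≠ [] →
    (let st := xs.foldl pvStepA (cur, acc)
     if st.1 ≠ [] then st.2 ++ [PySem.Str.strip (PySem.Str.join " " st.1)] else st.2) =
    acc ++ PySem.Str.strip (PySem.Str.join " " (cur ++ xs.takeWhile (fun l => !pvIsBoundaryB l)))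
        :: (pvChunksB (xs.dropWhile (fun l => !pvIsBoundaryB l))).map
            (fun c => PySem.Str.strip (PySem.Str.join " " c)) := by
  induction xs with
  | nil => intro cur acc h; simp [h, pvChunksB]
  | cons x xs ih =>
    intro cur acc h
    by_cases hb : pvIsBoundaryB x
    · have hs : pvStepA (cur, acc) x
          = ([x], acc ++ [PySem.Str.strip (PySem.Str.join " " cur)]) := by
        simp [pvStepA, pv_boundary_eq, hb, h]
      simp only [List.foldl_cons, hs]
      rw [ih [x] _ (by simp)]
      simp [hb, pvChunksB]
    · have hs : pvStepA (cur, acc) x = (cur ++ [x], acc) := by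
        simp [pvStepA, pv_boundary_eq, hb]
      simp only [List.foldl_cons, hs]
      rw [ih (cur ++ [x]) _ (by simp)]
      simp [hb]

-- A's whole second loop (from the empty buffer) = map-finalize over B's chunks
lemma pv_paras_eq (ls : List String) :
    (let st := ls.foldl pvStepA ([], [])
     if st.1 ≠ [] then st.2 ++ [PySem.Str.strip (PySem.Str.join " " st.1)] else st.2) =
    (pvChunksB ls).map (fun c => PySem.Str.strip (PySem.Str.join " " c)) := by
  cases ls with
  | nil => simp [pvChunksB]
  | cons x xs =>
    have h1 : pvStepA ([], []) x = ([x], []) := by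
      unfold pvStepA; split <;> simp
    simp only [List.foldl_cons, h1]
    rw [pv_fold_chunks xs [x] [] (by simp)]
    simp [pvChunksB]

-- ===== VERDICT (by name: the statement is the Claim_ definition above) =====
theorem parse_story_spec : Claim_equal_parse_story := by
  intro raw _
  show parse_story raw = parse_story_alt raw
  simp only [parse_story, parse_story_alt]
  rw [PySem.List.slice_to _ (Int.natCast_nonneg _), PySem.List.slice_from _ (Int.natCast_nonneg _),
      PySem.List.slice_from _ (Int.natCast_nonneg _)]
  generalize (PySem.Str.split? (PySem.Str.strip raw) "\n").getD [] = lines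
  rw [Int.toNat_natCast, Int.toNat_natCast]
  refine Prod.ext ?_ ?_
  · simp [pv_summary_take]
  · simpa [pv_summary_len] using pv_paras_eq (lines.drop (lines.findIdx pvIsBreak))
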